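-- pv_equiv track=rewrite | github.com/j0k/algopractice | seq/maxsubseq/mss1.py | mss
-- ===== SOURCE A (Python) =====
-- def mss(seq):
--     dist = 0
--
--     if len(seq)<=1:
--         return dist
--
--     last_trend = 0
--     trend = 0
--
--     mi, ma = seq[0], seq[0]
--     for (el, er) in zip(seq[:-1], seq[1:]):
--         if el == er:
--             pass
--         elif el < er:
--             trend = 1
--         else:
--             trend = -1
--
--         if last_trend != 0 and last_trend != trend:
--             mi = min(el, er)
--             ma = max(el, er)
--         else:
--             mi = min(mi, er)
--             ma = max(ma, er)
--
--         dist = max(dist, ma - mi)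
--         last_trend = trend
--
--     return dist
-- ===== SOURCE B (Python) =====
-- def mss(seq):
--     # Segmentation-first: one pass records the turning points that bound the
--     # maximal monotone runs (adjacent runs share the turning-point element),
--     # then a second pass takes the largest |last - first| over the runs.
--     if len(seq) <= 1:
--         return 0
--     marks = [seq[0]]
--     trend = 0
--     for a, b in zip(seq, seq[1:]):
--         if a == b:
--             t = trend
--         elif a < b:
--             t = 1
--         else:
--             t = -1
--         if trend != 0 and t != trend:
--             marks.append(a)
--         trend = t
--     marks.append(seq[-1])
--     best = 0
--     for x, y in zip(marks, marks[1:]):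
--         best = max(best, abs(y - x))
--     return best
-- ===== Notes on version B (the rewrite author's own statement) =====
-- stated objective: alternative
-- what changed: A maintains running min/max/dist with a reset at each trend reversal inside one loop; B first segments the sequence by collecting the turning-point marks of maximal monotone runs in one cheap pass, then a separate pass takes the largest |last-first| over adjacent marks.
import Mathlib
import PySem

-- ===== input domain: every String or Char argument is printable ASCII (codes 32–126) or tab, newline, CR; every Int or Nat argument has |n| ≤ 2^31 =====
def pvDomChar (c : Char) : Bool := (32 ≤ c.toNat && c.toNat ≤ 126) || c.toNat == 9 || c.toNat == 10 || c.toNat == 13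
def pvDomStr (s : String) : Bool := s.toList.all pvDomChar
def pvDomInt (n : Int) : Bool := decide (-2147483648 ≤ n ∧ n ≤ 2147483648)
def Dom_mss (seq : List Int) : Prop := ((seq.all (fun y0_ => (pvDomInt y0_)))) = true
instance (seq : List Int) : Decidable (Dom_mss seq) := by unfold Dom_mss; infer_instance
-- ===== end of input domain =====

-- B replaces A's intertwined running mi/ma/dist updates by a segmentation-first pass
-- (collect the turning points bounding the maximal monotone runs, then take the
-- largest |last - first| over the runs); objective: alternative decomposition.

-- ===== PORT A =====
-- state = (dist, last_trend, trend, mi, ma), one loop iteration of A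
def mssStep : (Int × Int × Int × Int × Int) → (Int × Int) → (Int × Int × Int × Int × Int)
  | (dist, last_trend, trend, mi, ma), (el, er) =>
    let trend' := if el = er then trend else if el < er then 1 else -1
    let p :=
      if last_trend ≠ 0 ∧ last_trend ≠ trend' then (min el er, max el er)
      else (min mi er, max ma er)
    (max dist (p.2 - p.1), trend', trend', p.1, p.2)

def mss (seq : List Int) : Int :=
  if seq.length ≤ 1 then 0
  else
    ((List.zip (PySem.List.slice seq none (some (-1))) (PySem.List.slice seq (some 1) none)).foldl
      mssStep (0, 0, 0, PySem.List.pyGetD seq 0 0, PySem.List.pyGetD seq 0 0)).1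

-- ===== PORT B =====
-- state = (marks, trend), one loop iteration of B's first (segmentation) pass
def mssAltStep : (List Int × Int) → (Int × Int) → (List Int × Int)
  | (marks, trend), (a, b) =>
    let t := if a = b then trend else if a < b then 1 else -1
    (if trend ≠ 0 ∧ t ≠ trend then marks ++ [a] else marks, t)

-- B's second pass: largest |y - x| over adjacent pairs of the marks list
def M (ms : List Int) : Int :=
  (List.zip ms ms.tail).foldl (fun best p => max best ((p.2 - p.1).natAbs : Int)) 0

def mss_alt (seq : List Int) : Int :=
  if seq.length ≤ 1 then 0
  else
    M (((List.zip seq (PySem.List.slice seq (some 1) none)).foldl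
          mssAltStep ([PySem.List.pyGetD seq 0 0], 0)).1
        ++ [PySem.List.pyGetD seq (-1) 0])

-- ===== PRECONDITION & SPEC =====
def Spec_mss (seq : List Int) (out : Int) : Prop := out = mss_alt seq
instance (seq : List Int) (out : Int) : Decidable (Spec_mss seq out) := by unfold Spec_mss; infer_instance

-- ===== CLAIM (what is proved, stated in full; the proofs are below) =====
def Claim_equal_mss : Prop := ∀ (seq : List Int), Dom_mss seq → Spec_mss seq (mss seq)

-- ===== LEMMAS AND PROOFS =====

-- adjacent pairs of a list
def adj : List Int → List (Int × Int)
  | x :: y :: r => (x, y) :: adj (y :: r)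
  | _ => []

theorem zip_tail_eq_adj : ∀ xs : List Int, List.zip xs xs.tail = adj xs
  | [] => rfl
  | [_] => rfl
  | x :: y :: r => by
    simpa [adj, List.zip] using zip_tail_eq_adj (y :: r)

theorem zip_dropLast_tail_eq_adj : ∀ xs : List Int, List.zip xs.dropLast xs.tail = adj xs
  | [] => rfl
  | [_] => rfl
  | x :: y :: r => by
    have h := zip_dropLast_tail_eq_adj (y :: r)
    simp [adj, List.zip] at h ⊢
    simpa using h

theorem adj_append_singleton : ∀ (ms : List Int) (h : ms ≠ []) (a : Int),
    adj (ms ++ [a]) = adj ms ++ [(ms.getLast h, a)]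
  | [x], _, a => by simp [adj]
  | x :: y :: r, _, a => by
    have h := adj_append_singleton (y :: r) (by simp) a
    simp [adj] at h ⊢
    simpa [List.getLast] using h

theorem M_append (ms : List Int) (h : ms ≠ []) (a : Int) :
    M (ms ++ [a]) = max (M ms) ((a - ms.getLast h).natAbs : Int) := by
  unfold M
  rw [zip_tail_eq_adj, zip_tail_eq_adj, adj_append_singleton ms h a, List.foldl_append]
  rfl

-- the sign relation the trend variable maintains between the current run's start r and the current element c
def rel (r c t : Int) : Prop := (t = 0 ∧ r = c) ∨ (t = 1 ∧ r ≤ c) ∨ (t = -1 ∧ c ≤ r)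

theorem main_inv : ∀ (rest marks : List Int) (h : marks ≠ []) (c t : Int),
    rel (marks.getLast h) c t →
    ((adj (c :: rest)).foldl mssStep
        (M (marks ++ [c]), t, t, min (marks.getLast h) c, max (marks.getLast h) c)).1
      = M (((adj (c :: rest)).foldl mssAltStep (marks, t)).1
            ++ [(c :: rest).getLast (by simp)]) := by
  intro rest
  induction rest with
  | nil =>
    intro marks h c t _
    simp [adj, M]
  | cons b rest ih =>
    intro marks h c t hrel
    have hadj : adj (c :: b :: rest) = (c, b) :: adj (b :: rest) := rfl
    rw [hadj]
    set t' : Int := if c = b then t else if c < b then 1 else -1 with ht'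
    by_cases hrev : t ≠ 0 ∧ t ≠ t'
    · -- reversal: a new run starts at c; B appends the mark c
      have hcb : c ≠ b := by
        intro hcb; apply hrev.2; rw [ht', if_pos hcb]
      have hstepA : mssStep (M (marks ++ [c]), t, t, min (marks.getLast h) c, max (marks.getLast h) c) (c, b)
          = (max (M (marks ++ [c])) (max c b - min c b), t', t', min c b, max c b) := by
        simp [mssStep, ← ht', if_pos hrev]
      have hstepB : mssAltStep (marks, t) (c, b) = (marks ++ [c], t') := by
        simp only [mssAltStep, ← ht']
        rw [if_pos ⟨hrev.1, Ne.symm hrev.2⟩]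
      rw [List.foldl_cons, List.foldl_cons, hstepA, hstepB]
      have hlast : (marks ++ [c]).getLast (by simp) = c := by simp
      have hrel' : rel c b t' := by
        rcases lt_trichotomy c b with hlt | heq | hgt
        · right; left; constructor
          · rw [ht', if_neg hcb, if_pos hlt]
          · exact le_of_lt hlt
        · exact absurd heq hcb
        · right; right; constructor
          · rw [ht', if_neg hcb, if_neg (not_lt_of_gt hgt)]
          · exact le_of_lt hgt
      have hM : M (marks ++ [c] ++ [b]) = max (M (marks ++ [c])) (max c b - min c b) := by
        rw [M_append (marks ++ [c]) (by simp) b, hlast]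
        congr 1; omega
      have := ih (marks ++ [c]) (by simp) b t' (by rw [hlast]; exact hrel')
      rw [hlast] at this
      rw [hM] at this
      simpa [List.getLast_cons] using this
    · -- no reversal: the run continues
      have hA : (if t ≠ 0 ∧ t ≠ t' then (min c b, max c b)
            else (min (min (marks.getLast h) c) b, max (max (marks.getLast h) c) b))
          = (min (min (marks.getLast h) c) b, max (max (marks.getLast h) c) b) := by
        rw [if_neg hrev]
      set r := marks.getLast h with hr
      -- orderings implied by rel and absence of reversal
      have hord : rel r b t' ∧ min (min r c) b = min r b ∧ max (max r c) b = max r b ∧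
          (c - r).natAbs ≤ (b - r).natAbs := by
        rcases hrel with ⟨h0, hrc⟩ | ⟨h1, hrc⟩ | ⟨h2, hrc⟩
        · subst h0
          rcases lt_trichotomy c b with hlt | heq | hgt
          · have : t' = 1 := by rw [ht', if_neg (ne_of_lt hlt), if_pos hlt]
            refine ⟨Or.inr (Or.inl ⟨this, by omega⟩), by omega, by omega, by omega⟩
          · have : t' = (0:Int) := by rw [ht', if_pos heq]
            refine ⟨Or.inl ⟨this, by omega⟩, by omega, by omega, by omega⟩
          · have : t' = -1 := by
              rw [ht', if_neg (ne_of_gt hgt), if_neg (not_lt_of_gt hgt)]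
            refine ⟨Or.inr (Or.inr ⟨this, by omega⟩), by omega, by omega, by omega⟩
        · -- t = 1, so t' = 1 (no reversal), hence c ≤ b
          have ht'1 : t' = 1 := by
            by_contra hne
            exact hrev ⟨by omega, fun he => hne (he ▸ h1.symm ▸ rfl)⟩
          have hcb : c ≤ b := by
            by_contra hcb
            have : t' = -1 := by
              rw [ht', if_neg (by omega : c ≠ b), if_neg (by omega)]
            omega
          refine ⟨Or.inr (Or.inl ⟨ht'1, by omega⟩), by omega, by omega, by omega⟩
        · have ht'2 : t' = -1 := by
            by_contra hne
            exact hrev ⟨by omega, fun he => hne (he ▸ h2.symm ▸ rfl)⟩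
          have hcb : b ≤ c := by
            by_contra hcb
            have : t' = 1 := by
              rw [ht', if_neg (by omega : c ≠ b), if_pos (by omega)]
            omega
          refine ⟨Or.inr (Or.inr ⟨ht'2, by omega⟩), by omega, by omega, by omega⟩
      obtain ⟨hrel', hmin, hmax, hle⟩ := hord
      have hstepA : mssStep (M (marks ++ [c]), t, t, min r c, max r c) (c, b)
          = (max (M (marks ++ [c])) (max r b - min r b), t', t', min r b, max r b) := by
        simp only [mssStep, ← ht', if_neg hrev]
        rw [show min (min r c) b = min r b from hmin, show max (max r c) b = max r b from hmax]
      have hstepB : mssAltStep (marks, t) (c, b) = (marks, t') := by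
        simp only [mssAltStep, ← ht']
        rw [if_neg (by tauto)]
      rw [List.foldl_cons, List.foldl_cons, hstepA, hstepB]
      have hMc : M (marks ++ [c]) = max (M marks) ((c - r).natAbs : Int) := M_append marks h c
      have hMb : M (marks ++ [b]) = max (M marks) ((b - r).natAbs : Int) := M_append marks h b
      have hdist : max (M (marks ++ [c])) (max r b - min r b) = M (marks ++ [b]) := by
        rw [hMc, hMb]; omega
      rw [hdist]
      exact ih marks h b t' hrel'

-- ===== VERDICT (by name: the statement is the Claim_ definition above) =====
theorem mss_spec : Claim_equal_mss := by
  unfold Claim_equal_mss Spec_mss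
  intro seq _
  by_cases hlen : seq.length ≤ 1
  · simp [mss, mss_alt, hlen]
  · match seq, hlen with
    | x :: l, hlen =>
      unfold mss mss_alt
      rw [if_neg hlen, if_neg hlen]
      have e4 : PySem.List.pyGetD (x :: l) (-1) 0 = (x :: l).getLast (by simp) := by
        rw [PySem.List.pyGetD_neg_one]
      rw [PySem.List.slice_to_neg_one, PySem.List.slice_from_one,
        PySem.List.pyGetD_zero_cons, e4, zip_dropLast_tail_eq_adj,
        zip_tail_eq_adj (x :: l)]
      have h0 : M ([x] ++ [x]) = 0 := by simp [M, List.zip]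
      have hmain := main_inv l [x] (by simp) x 0 (Or.inl ⟨rfl, rfl⟩)
      simp only [List.getLast_singleton] at hmain
      rw [h0, min_self, max_self] at hmain
      exact hmain
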